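-- pv_equiv track=rewrite | github.com/469434849/demo | test.py | merge_communities
-- ===== SOURCE A (Python) =====
-- def merge_communities(G, partition, target_num_communities):
--     # Convert partition to a format suitable for merging
--     communities = {}
--     for node, community in partition.items():
--         if community not in communities:
--             communities[community] = []
--         communities[community].append(node)
--
--     # Merge communities until reaching the target number of communities
--     while len(communities) > target_num_communities:
--         # Find the two smallest communities to merge
--         smallest_communities = sorted(communities.items(), key=lambda x: len(x[1]))[:2]
--         comm1, nodes1 = smallest_communities[0]
--         comm2, nodes2 = smallest_communities[1]
--
--         # Merge the two communities
--         new_comm = max(communities.keys()) + 1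
--         communities[new_comm] = nodes1 + nodes2
--         del communities[comm1]
--         del communities[comm2]
--
--         # Update partition to reflect the merge
--         for node in nodes1 + nodes2:
--             partition[node] = new_comm
--
--     return partition
-- ===== SOURCE B (Python) =====
-- def merge_communities(G, partition, target_num_communities):
--     # Two-queue Huffman-style merging: one initial stable sort of the original
--     # communities by size (q1) plus a FIFO of merged communities (q2) whose
--     # sizes are provably non-decreasing, so each merge picks its two smallest
--     # communities by comparing only the two queue fronts -- no per-iteration
--     # sort or scan.  Ties prefer q1, matching dict insertion order (originals
--     # precede merged communities).  The partition dict is relabelled once at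
--     # the end from the surviving communities.
--     groups = {}
--     for node, community in partition.items():
--         groups.setdefault(community, []).append(node)
--     q1 = sorted(groups.items(), key=lambda c: len(c[1]))
--     q2 = []
--     i = j = 0
--     next_label = max(groups) + 1 if groups else 0
--     num = len(q1)
--     while num > target_num_communities:
--         pair = []
--         for _ in range(2):
--             if i < len(q1) and (j >= len(q2) or len(q1[i][1]) <= len(q2[j][1])):
--                 pair.append(q1[i])
--                 i += 1
--             else:
--                 pair.append(q2[j])
--                 j += 1
--         q2.append((next_label, pair[0][1] + pair[1][1]))
--         next_label += 1
--         num -= 1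
--     # Surviving original communities (q1[i:]) already carry their own label in
--     # `partition`; only nodes of surviving merged communities need relabelling.
--     for label, nodes in q2[j:]:
--         for node in nodes:
--             partition[node] = label
--     return partition
-- ===== Notes on version B (the rewrite author's own statement) =====
-- stated objective: alternative
-- what changed: B replaces A's per-merge full re-sort of all communities by the two-queue Huffman technique: one initial stable sort of the original communities plus a FIFO queue of merged communities (whose sizes are provably non-decreasing), so each merge inspects only the two queue fronts, and only nodes of surviving merged communities are relabelled, in one final pass instead of per merge.
import Mathlib
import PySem

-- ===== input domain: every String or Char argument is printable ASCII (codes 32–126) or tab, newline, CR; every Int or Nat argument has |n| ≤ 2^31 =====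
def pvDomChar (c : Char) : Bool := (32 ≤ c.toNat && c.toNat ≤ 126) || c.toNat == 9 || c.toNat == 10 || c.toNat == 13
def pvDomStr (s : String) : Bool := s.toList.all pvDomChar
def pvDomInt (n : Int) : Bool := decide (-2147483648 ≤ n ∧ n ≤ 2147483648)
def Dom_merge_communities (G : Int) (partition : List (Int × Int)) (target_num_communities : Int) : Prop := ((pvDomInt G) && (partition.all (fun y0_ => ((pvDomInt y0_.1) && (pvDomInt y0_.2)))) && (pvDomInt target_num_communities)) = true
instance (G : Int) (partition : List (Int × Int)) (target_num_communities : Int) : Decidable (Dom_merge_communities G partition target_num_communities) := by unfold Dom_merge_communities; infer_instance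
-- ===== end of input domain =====

-- B replaces A's per-merge full re-sort by two-queue Huffman merging (one initial sort + a FIFO of
-- merged communities, each merge inspecting only the two queue fronts) and relabels only the nodes
-- of surviving merged communities, in one final pass. A also mutates `partition` in place per merge
-- in Python; the equivalence proved is about the returned value.


-- ===== PORT A =====
-- communities = {}; for node, community in partition.items(): …
def pvAGroup (partition : List (Int × Int)) : PySem.Dict Int (List Int) :=
  partition.foldl (fun d p =>
    let d' := if d.contains p.2 then d else d.insert p.2 ([] : List Int)
    d'.modify p.2 [] (fun ns => ns ++ [p.1])) PySem.Dict.empty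

-- while len(communities) > target: sort by len, take first two, merge, rewrite partition.
-- (fuel = initial community count; the while-loop removes one community per iteration.
--  `none`/short-match branches are Python raise points, unreachable under Pre_.)
def pvALoop (target : Int) : Nat → PySem.Dict Int (List Int) → PySem.Dict Int Int → PySem.Dict Int Int
  | 0, _, part => part
  | fuel+1, comms, part =>
    if target < (comms.size : Int) then
      match PySem.List.sorted comms.items (fun x => x.2.length) false with
      | (c1, ns1) :: (c2, ns2) :: _ =>
        match PySem.List.max? comms.keys (fun k => k) with
        | some mx =>
          let newc := mx + 1
          let comms' := ((comms.insert newc (ns1 ++ ns2)).erase c1).erase c2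
          let part' := (ns1 ++ ns2).foldl (fun d n => d.insert n newc) part
          pvALoop target fuel comms' part'
        | none => part
      | _ => part
    else part

def merge_communities (G : Int) (partition : List (Int × Int)) (target_num_communities : Int) : List (Int × Int) :=
  let communities := pvAGroup partition
  (pvALoop target_num_communities communities.size communities (PySem.Dict.mk partition)).items

-- ===== PORT B =====
-- groups = {}; for node, community in partition.items(): groups.setdefault(community, []).append(node)
def pvBGroup (partition : List (Int × Int)) : PySem.Dict Int (List Int) :=
  partition.foldl (fun d p => (d.setdefault p.2 ([] : List Int)).modify p.2 [] (fun ns => ns ++ [p.1]))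
    PySem.Dict.empty

-- one turn of Source B's `for _ in range(2)` front-picking: take q1[i] when it exists and is no larger
-- than q2[j], else q2[j]; `none` is Python's IndexError (both queues exhausted), outside Pre_.
def pvPick (q1 q2 : List (Int × List Int)) (i j : Nat) : Option ((Int × List Int) × Nat × Nat) :=
  if i < q1.length ∧ (q2.length ≤ j ∨ (q1.getD i (0, [])).2.length ≤ (q2.getD j (0, [])).2.length) then
    (q1[i]?).map (fun c => (c, i + 1, j))
  else
    (q2[j]?).map (fun c => (c, i, j + 1))

-- while num > target: pick two fronts, append their merge to q2, next_label += 1, num -= 1.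
-- (fuel = len(q1) bounds the iterations the loop performs under Pre_.)
def pvBLoop (target : Int) : Nat → List (Int × List Int) → List (Int × List Int) → Nat → Nat → Int → Int → (List (Int × List Int) × Nat × Nat)
  | 0, _, q2, i, j, _, _ => (q2, i, j)
  | fuel+1, q1, q2, i, j, next, num =>
    if target < num then
      match pvPick q1 q2 i j with
      | none => (q2, i, j)
      | some (c1, i1, j1) =>
        match pvPick q1 q2 i1 j1 with
        | none => (q2, i, j)
        | some (c2, i2, j2) =>
          pvBLoop target fuel q1 (q2 ++ [(next, c1.2 ++ c2.2)]) i2 j2 (next + 1) (num - 1)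
    else (q2, i, j)

-- for label, nodes in q2[j:]: for node in nodes: partition[node] = label
def pvBFinal (comms : List (Int × List Int)) (part : PySem.Dict Int Int) : PySem.Dict Int Int :=
  comms.foldl (fun p c => c.2.foldl (fun p n => p.insert n c.1) p) part

def merge_communities_alt (G : Int) (partition : List (Int × Int)) (target_num_communities : Int) : List (Int × Int) :=
  let groups := pvBGroup partition
  let q1 := PySem.List.sorted groups.items (fun c => c.2.length) false
  let next : Int := match PySem.List.max? groups.keys (fun k => k) with
    | some m => m + 1
    | none => 0
  let r := pvBLoop target_num_communities q1.length q1 [] 0 0 next (q1.length : Int)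
  (pvBFinal (r.1.drop r.2.2) (PySem.Dict.mk partition)).items

-- ===== PRECONDITION & SPEC =====
-- Pre_ excludes (i) association lists with duplicate node keys, which do not denote a Python dict
-- (A receives `partition` as a dict), and (ii) the inputs on which A raises IndexError (and B
-- IndexError too): a community count above the target that must shrink below 1, i.e.
-- target_num_communities < 1 while the number of distinct communities exceeds it.
def Pre_merge_communities (G : Int) (partition : List (Int × Int)) (target_num_communities : Int) : Prop :=
  (partition.map Prod.fst).Nodup ∧
  (1 ≤ target_num_communities ∨
    ((PySem.List.dedup (partition.map Prod.snd)).length : Int) ≤ target_num_communities)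

instance (G : Int) (partition : List (Int × Int)) (target_num_communities : Int) : Decidable (Pre_merge_communities G partition target_num_communities) := by unfold Pre_merge_communities; infer_instance

def pvWitness_merge_communities : Int × (List (Int × Int)) × Int := (0, [(1, 10), (2, 10), (3, 20), (4, 30)], 2)

def Spec_merge_communities (G : Int) (partition : List (Int × Int)) (target_num_communities : Int) (out : List (Int × Int)) : Prop := out = merge_communities_alt G partition target_num_communities
instance (G : Int) (partition : List (Int × Int)) (target_num_communities : Int) (out : List (Int × Int)) : Decidable (Spec_merge_communities G partition target_num_communities out) := by unfold Spec_merge_communities; infer_instance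

-- ===== CLAIM (what is proved, stated in full; the proofs are below) =====
def Claim_equal_merge_communities : Prop := ∀ (G : Int) (partition : List (Int × Int)) (target_num_communities : Int), Dom_merge_communities G partition target_num_communities → Pre_merge_communities G partition target_num_communities → Spec_merge_communities G partition target_num_communities (merge_communities G partition target_num_communities)

-- ===== LEMMAS AND PROOFS =====

-- proof-only helper: both grouping phases are extensionally this single modify-fold
def pvG (partition : List (Int × Int)) : PySem.Dict Int (List Int) :=
  partition.foldl (fun d p => d.modify p.2 [] (fun ns => ns ++ [p.1])) PySem.Dict.empty

-- proof-only intermediate loop: A's merge sequence expressed as two first-minimum scans on the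
-- plain community list (dict order), bridging A's sort-based selection and B's two queues.
def pvMLoop (target : Int) : Nat → List (Int × List Int) → Int → List (Int × List Int)
  | 0, comms, _ => comms
  | fuel+1, comms, next =>
    if target < (comms.length : Int) then
      match PySem.List.min? comms (fun c => c.2.length) with
      | some fst =>
        match PySem.List.remove? comms fst with
        | some comms1 =>
          match PySem.List.min? comms1 (fun c => c.2.length) with
          | some snd =>
            match PySem.List.remove? comms1 snd with
            | some comms2 => pvMLoop target fuel (comms2 ++ [(next, fst.2 ++ snd.2)]) (next + 1)
            | none => comms
          | none => comms
        | none => comms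
      | none => comms
    else comms

theorem pv_insertBy_nil {α : Type} (b : α → α → Bool) (x : α) : PySem.List.insertBy b x [] = [x] := rfl
theorem pv_insertBy_cons {α : Type} (b : α → α → Bool) (x y : α) (ys : List α) :
    PySem.List.insertBy b x (y :: ys) = if b x y then x :: y :: ys else y :: PySem.List.insertBy b x ys := rfl

theorem pv_min?_append_singleton {α : Type} (key : α → Nat) (xs : List α) (x : α) :
    PySem.List.min? (xs ++ [x]) key =
      match PySem.List.min? xs key with
      | none => some x
      | some m => if key x < key m then some x else some m := by
  rw [PySem.List.min?, PySem.List.min?, List.foldl_append]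
  rfl

theorem pv_sorted_append_singleton {α : Type} (key : α → Nat) (xs : List α) (x : α) :
    PySem.List.sorted (xs ++ [x]) key false =
      PySem.List.insertBy (fun a b => decide (key a < key b)) x (PySem.List.sorted xs key false) := by
  simp [PySem.List.sorted, List.foldl_append]

theorem pv_sorted_cons_min {α : Type} [BEq α] [LawfulBEq α] (key : α → Nat) (xs : List α) (m : α)
    (h : PySem.List.min? xs key = some m) :
    PySem.List.sorted xs key false = m :: PySem.List.sorted (xs.erase m) key false := by
  induction xs using List.reverseRecOn generalizing m with
  | nil => simp [PySem.List.min?] at h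
  | append_singleton ys x ih =>
    rw [pv_min?_append_singleton] at h
    rw [pv_sorted_append_singleton]
    cases hys : PySem.List.min? ys key with
    | none =>
      have : ys = [] := (PySem.List.min?_eq_none_iff ys key).mp hys
      subst this
      simp [hys] at h
      subst h
      simp [PySem.List.sorted, pv_insertBy_nil]
    | some m0 =>
      rw [hys] at h
      rw [ih m0 hys]
      by_cases hlt : key x < key m0
      · simp only [hlt, if_pos] at h
        have hxm : x = m := Option.some.inj h
        subst hxm
        have hxny : x ∉ ys := by
          intro hmem
          exact absurd (PySem.List.min?_isMin hys x hmem) (by omega)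
        rw [pv_insertBy_cons]
        simp only [hlt, decide_true, if_true]
        rw [List.erase_append_right _ hxny]
        simp [ih m0 hys]
      · simp only [hlt, if_false] at h
        have hmm : m0 = m := Option.some.inj h
        subst hmm
        rw [pv_insertBy_cons]
        simp [hlt]
        have hmem : m0 ∈ ys := PySem.List.min?_mem hys
        rw [List.erase_append_left _ hmem, pv_sorted_append_singleton]

theorem pv_filter_key_eq_erase (xs : List (Int × List Int)) (c : Int) (ns : List Int)
    (hnd : (xs.map Prod.fst).Nodup) (hmem : (c, ns) ∈ xs) :
    xs.filter (fun p => !(p.1 == c)) = xs.erase (c, ns) := by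
  induction xs with
  | nil => simp at hmem
  | cons q xs ih =>
    simp only [List.map_cons, List.nodup_cons, List.mem_map] at hnd
    by_cases hq : q.1 = c
    · have hqe : q = (c, ns) := by
        rcases List.mem_cons.mp hmem with h | h
        · exact h.symm
        · exact absurd ⟨(c, ns), h, hq.symm ▸ rfl⟩ hnd.1
      subst hqe
      rw [List.erase_cons_head]
      simp only [List.filter_cons]
      simp only [beq_self_eq_true, Bool.not_true]
      apply List.filter_eq_self.mpr
      intro p hp
      simp only [Bool.not_eq_eq_eq_not, Bool.not_true, beq_eq_false_iff_ne, ne_eq]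
      intro hpc
      exact hnd.1 ⟨p, hp, hpc⟩
    · have hqne : q ≠ (c, ns) := by intro h; exact hq (by rw [h])
      rw [List.erase_cons_tail (by simp [hqne])]
      simp only [List.filter_cons]
      have : (!(q.1 == c)) = true := by simp [hq]
      rw [this]
      simp only [if_true]
      have hmem' : (c, ns) ∈ xs := by
        rcases List.mem_cons.mp hmem with h | h
        · exact absurd h (fun hh => hqne hh.symm)
        · exact h
      rw [ih hnd.2 hmem']

theorem pv_erase_sub (xs : List (Int × List Int)) (e : Int × List Int) :
    ((xs.erase e).map Prod.fst).Sublist (xs.map Prod.fst) :=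
  List.Sublist.map _ List.erase_sublist

theorem pv_step_items (xs : List (Int × List Int)) (newc : Int) (v : List Int)
    (c1 : Int) (ns1 : List Int) (c2 : Int) (ns2 : List Int)
    (hnd : (xs.map Prod.fst).Nodup) (hfresh : newc ∉ xs.map Prod.fst)
    (h1 : (c1, ns1) ∈ xs) (h2 : (c2, ns2) ∈ xs.erase (c1, ns1)) :
    ((((PySem.Dict.mk xs).insert newc v).erase c1).erase c2).items =
      (xs.erase (c1, ns1)).erase (c2, ns2) ++ [(newc, v)] := by
  have hc1 : c1 ∈ xs.map Prod.fst := List.mem_map.mpr ⟨(c1, ns1), h1, rfl⟩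
  have hc2 : c2 ∈ (xs.erase (c1, ns1)).map Prod.fst := List.mem_map.mpr ⟨(c2, ns2), h2, rfl⟩
  have hnd1 : ((xs.erase (c1, ns1)).map Prod.fst).Nodup := hnd.sublist (pv_erase_sub xs _)
  have hnotc : ((PySem.Dict.mk xs).contains newc) = false := by
    rw [Bool.eq_false_iff]
    intro hc
    exact hfresh ((PySem.Dict.contains_iff_mem_keys _ _).mp hc)
  have hins : (((PySem.Dict.mk xs).insert newc v)).items = xs ++ [(newc, v)] := by
    rw [PySem.Dict.items_insert_of_not_contains _ _ hnotc]
  have hne1 : newc ≠ c1 := fun h => hfresh (h ▸ hc1)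
  have hne2 : newc ≠ c2 := fun h =>
    hfresh (h ▸ (List.Sublist.mem hc2 (pv_erase_sub xs (c1, ns1))))
  show ((((PySem.Dict.mk xs).insert newc v).items.filter (fun p => !(p.1 == c1))).filter
      (fun p => !(p.1 == c2))) = _
  rw [hins, List.filter_append, List.filter_append]
  have e1 : ([(newc, v)].filter (fun p : Int × List Int => !(p.1 == c1))) = [(newc, v)] := by
    simp [hne1]
  have e2 : ([(newc, v)].filter (fun p : Int × List Int => !(p.1 == c2))) = [(newc, v)] := by
    simp [hne2]
  rw [e1, e2, pv_filter_key_eq_erase xs c1 ns1 hnd h1,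
    pv_filter_key_eq_erase _ c2 ns2 hnd1 h2]

theorem pv_get?_foldl_insert (ns : List Int) (p : PySem.Dict Int Int) (w m : Int) :
    (ns.foldl (fun d n => d.insert n w) p).get? m = if m ∈ ns then some w else p.get? m := by
  induction ns generalizing p with
  | nil => simp
  | cons n ns ih =>
    simp only [List.foldl_cons, ih, List.mem_cons]
    by_cases h : m ∈ ns
    · simp [h]
    · simp only [h, if_false, or_false]
      by_cases hmn : m = n
      · subst hmn; simp [PySem.Dict.get?_insert_self]
      · simp [hmn, PySem.Dict.get?_insert_of_ne _ _ hmn]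

theorem pv_mem_keys_foldl_insert (ns : List Int) (p : PySem.Dict Int Int) (w m : Int)
    (h : m ∈ p.keys) : m ∈ (ns.foldl (fun d n => d.insert n w) p).keys := by
  induction ns generalizing p with
  | nil => exact h
  | cons n ns ih =>
    exact ih _ ((PySem.Dict.mem_keys_insert _ _ _ _).mpr (Or.inr h))

theorem pv_nodup_keys_foldl_insert (ns : List Int) (p : PySem.Dict Int Int) (w : Int)
    (h : p.keys.Nodup) : (ns.foldl (fun d n => d.insert n w) p).keys.Nodup := by
  induction ns generalizing p with
  | nil => exact h
  | cons n ns ih => exact ih _ (PySem.Dict.nodup_keys_insert _ _ _ h)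

theorem pv_insert_comm (p : PySem.Dict Int Int) (n x v w : Int)
    (hn : n ∈ p.keys) (hne : x ≠ n) :
    (p.insert n v).insert x w = (p.insert x w).insert n v := by
  have hcn : p.contains n = true := (PySem.Dict.contains_iff_mem_keys _ _).mpr hn
  by_cases hcx : p.contains x = true
  · have h1 := PySem.Dict.items_insert_of_contains p v hcn
    have hcn' : (p.insert n v).contains x = true := by
      rw [PySem.Dict.contains_insert]; simp [hcx]
    have hcx' : (p.insert x w).contains n = true := by
      rw [PySem.Dict.contains_insert]; simp [hcn]
    apply PySem.Dict.ext
    rw [PySem.Dict.items_insert_of_contains _ w hcn',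
        PySem.Dict.items_insert_of_contains p v hcn,
        PySem.Dict.items_insert_of_contains _ v hcx',
        PySem.Dict.items_insert_of_contains p w hcx,
        List.map_map, List.map_map]
    apply List.map_congr_left
    intro q _
    simp only [Function.comp_apply]
    by_cases hq1 : q.1 = n
    · simp [hq1, Ne.symm hne]
    · by_cases hq2 : q.1 = x
      · simp [hq2, hne]
      · simp [hq1, hq2]
  · have hcx' : p.contains x = false := by simpa using hcx
    have hcnx : (p.insert n v).contains x = false := by
      rw [PySem.Dict.contains_insert]; simp [hcx', hne]
    have hcxn : (p.insert x w).contains n = true := by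
      rw [PySem.Dict.contains_insert]; simp [hcn]
    apply PySem.Dict.ext
    rw [PySem.Dict.items_insert_of_not_contains _ _ hcnx,
        PySem.Dict.items_insert_of_contains p v hcn,
        PySem.Dict.items_insert_of_contains _ v hcxn,
        PySem.Dict.items_insert_of_not_contains _ _ hcx',
        List.map_append]
    simp only [List.map_cons, List.map_nil]
    have : ((x == n) = true → x = n ∧ w = v) := fun h => absurd (by simpa using h) hne
    simp [hne]

theorem pv_foldl_insert_absorb (ns : List Int) (p : PySem.Dict Int Int) (n v w : Int)
    (hn : n ∈ p.keys) (hmem : n ∈ ns) :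
    ns.foldl (fun d x => d.insert x w) (p.insert n v) = ns.foldl (fun d x => d.insert x w) p := by
  induction ns generalizing p v with
  | nil => simp at hmem
  | cons x ns ih =>
    simp only [List.foldl_cons]
    by_cases hx : x = n
    · subst hx; rw [PySem.Dict.insert_insert_self]
    · rw [pv_insert_comm p n x v w hn hx]
      have hmem' : n ∈ ns := by
        rcases List.mem_cons.mp hmem with h | h
        · exact absurd h.symm hx
        · exact h
      exact ih _ _ ((PySem.Dict.mem_keys_insert _ _ _ _).mpr (Or.inr hn)) hmem'

theorem pv_foldl_insert_out (ns : List Int) (p : PySem.Dict Int Int) (n v w : Int)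
    (hn : n ∈ p.keys) (hout : n ∉ ns) :
    ns.foldl (fun d x => d.insert x w) (p.insert n v) = (ns.foldl (fun d x => d.insert x w) p).insert n v := by
  induction ns generalizing p with
  | nil => rfl
  | cons x ns ih =>
    simp only [List.foldl_cons]
    have hx : x ≠ n := fun h => hout (h ▸ List.mem_cons_self)
    rw [pv_insert_comm p n x v w hn hx]
    exact ih _ ((PySem.Dict.mem_keys_insert _ _ _ _).mpr (Or.inr hn))
      (fun h => hout (List.mem_cons_of_mem _ h))

theorem pv_final_absorb (C : List (Int × List Int)) (p : PySem.Dict Int Int) (n v : Int)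
    (hn : n ∈ p.keys) (hcov : n ∈ C.flatMap (fun c => c.2)) :
    pvBFinal C (p.insert n v) = pvBFinal C p := by
  induction C generalizing p v with
  | nil => simp at hcov
  | cons c C ih =>
    simp only [pvBFinal, List.foldl_cons]
    by_cases hmem : n ∈ c.2
    · rw [pv_foldl_insert_absorb _ _ _ _ _ hn hmem]
    · have hcov' : n ∈ C.flatMap (fun c => c.2) := by
        simp only [List.flatMap_cons, List.mem_append] at hcov
        exact hcov.resolve_left hmem
      rw [pv_foldl_insert_out _ _ _ _ _ hn hmem]
      exact ih _ _ (pv_mem_keys_foldl_insert _ _ _ _ hn) hcov'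

theorem pv_final_absorb_fold (ms : List Int) (C : List (Int × List Int)) (p : PySem.Dict Int Int) (w : Int)
    (h : ∀ n ∈ ms, n ∈ p.keys ∧ n ∈ C.flatMap (fun c => c.2)) :
    pvBFinal C (ms.foldl (fun d n => d.insert n w) p) = pvBFinal C p := by
  induction ms generalizing p with
  | nil => rfl
  | cons n ms ih =>
    simp only [List.foldl_cons]
    rw [ih _ (fun n' hn' => ⟨(PySem.Dict.mem_keys_insert _ _ _ _).mpr
        (Or.inr (h n' (List.mem_cons_of_mem _ hn')).1), (h n' (List.mem_cons_of_mem _ hn')).2⟩)]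
    exact pv_final_absorb C p n w (h n List.mem_cons_self).1 (h n List.mem_cons_self).2

theorem pv_insert_same (p : PySem.Dict Int Int) (n v : Int)
    (hnd : p.keys.Nodup) (h : p.get? n = some v) : p.insert n v = p := by
  have hc : p.contains n = true := by
    rw [PySem.Dict.contains_iff_mem_keys]
    exact PySem.Dict.mem_keys_of_mem_items p (PySem.Dict.mem_items_of_get?_eq_some p h)
  apply PySem.Dict.ext
  rw [PySem.Dict.items_insert_of_contains p v hc]
  conv_rhs => rw [← List.map_id p.items]
  apply List.map_congr_left
  intro q hq
  show (if (q.1 == n) = true then (n, v) else q) = q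
  by_cases hqn : q.1 = n
  · have hv : p.get? q.1 = some q.2 := PySem.Dict.get?_of_mem_items p hq hnd
    rw [hqn] at hv
    have h2 : q.2 = v := by rw [h] at hv; exact (Option.some.inj hv).symm
    simp only [hqn, beq_self_eq_true, if_true]
    exact Prod.ext hqn.symm h2.symm
  · simp [hqn]

theorem pv_foldl_insert_noop (p : PySem.Dict Int Int) (l : Int) (hnd : p.keys.Nodup) :
    ∀ ns : List Int, (∀ n ∈ ns, p.get? n = some l) →
      ns.foldl (fun p n => p.insert n l) p = p := by
  intro ns
  induction ns with
  | nil => intro _; rfl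
  | cons n ns ih =>
    intro hc
    simp only [List.foldl_cons]
    rw [pv_insert_same p n l hnd (hc n List.mem_cons_self)]
    exact ih (fun n' h => hc n' (List.mem_cons_of_mem _ h))

theorem pv_final_noop (C : List (Int × List Int)) (p : PySem.Dict Int Int)
    (hnd : p.keys.Nodup)
    (h : ∀ l ns, (l, ns) ∈ C → ∀ n ∈ ns, p.get? n = some l) :
    pvBFinal C p = p := by
  induction C generalizing p with
  | nil => rfl
  | cons c C ih =>
    simp only [pvBFinal, List.foldl_cons]
    rw [pv_foldl_insert_noop p c.1 hnd c.2 (h c.1 c.2 List.mem_cons_self)]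
    exact ih p hnd (fun l ns hm => h l ns (List.mem_cons_of_mem _ hm))

theorem pv_foldl_funext {α β : Type} (f g : β → α → β) (h : ∀ d x, f d x = g d x) :
    ∀ (xs : List α) (d : β), xs.foldl f d = xs.foldl g d := by
  intro xs
  induction xs with
  | nil => intro d; rfl
  | cons x xs ih => intro d; simp only [List.foldl_cons, h]; exact ih _

theorem pv_stepA_eq (d : PySem.Dict Int (List Int)) (p : Int × Int) :
    (let d' := if d.contains p.2 then d else d.insert p.2 ([] : List Int)
     d'.modify p.2 [] (fun ns => ns ++ [p.1])) = d.modify p.2 [] (fun ns => ns ++ [p.1]) := by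
  by_cases hc : d.contains p.2 = true
  · simp [hc]
  · have hc' : d.contains p.2 = false := by simpa using hc
    simp only [hc', Bool.false_eq_true, if_false]
    show (d.insert p.2 []).modify p.2 [] (fun ns => ns ++ [p.1]) = _
    unfold PySem.Dict.modify
    rw [PySem.Dict.getD_insert_self, PySem.Dict.insert_insert_self]
    congr 1
    have : d.get? p.2 = none := by
      rw [PySem.Dict.get?_eq_none_iff_contains]; exact hc'
    show ([] : List Int) ++ [p.1] = d.getD p.2 [] ++ [p.1]
    unfold PySem.Dict.getD
    rw [this]
    rfl

theorem pv_stepB_eq (d : PySem.Dict Int (List Int)) (p : Int × Int) :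
    (d.setdefault p.2 ([] : List Int)).modify p.2 [] (fun ns => ns ++ [p.1]) =
      d.modify p.2 [] (fun ns => ns ++ [p.1]) := by
  by_cases hc : d.contains p.2 = true
  · rw [PySem.Dict.setdefault_of_contains _ _ hc]
  · have hc' : d.contains p.2 = false := by simpa using hc
    rw [PySem.Dict.setdefault_of_not_contains _ _ hc']
    exact pv_stepA_eq d p ▸ (by simp [hc'])

theorem pv_AGroup_eq (partition : List (Int × Int)) : pvAGroup partition = pvG partition :=
  pv_foldl_funext _ _ pv_stepA_eq partition _

theorem pv_BGroup_eq (partition : List (Int × Int)) : pvBGroup partition = pvG partition :=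
  pv_foldl_funext _ _ pv_stepB_eq partition _

theorem pv_G_keys (partition : List (Int × Int)) :
    (pvG partition).keys = PySem.List.dedup (partition.map Prod.snd) := by
  show (partition.foldl (fun d p => d.modify p.2 [] (fun ns => ns ++ [p.1])) PySem.Dict.empty).keys = _
  have h := PySem.Dict.keys_foldl_modify_key partition (fun p => p.2) ([] : List Int)
      (fun _ p ns => ns ++ [p.1]) PySem.Dict.empty
  rw [h, PySem.Dict.keys_empty, PySem.Set.update_nil_left, PySem.List.dedup_eq_ofList]

theorem pv_G_nodup_keys (partition : List (Int × Int)) : (pvG partition).keys.Nodup := by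
  exact PySem.Dict.nodup_keys_foldl_modify_key partition (fun p => p.2) ([] : List Int)
    (fun _ p ns => ns ++ [p.1]) PySem.Dict.empty (by rw [PySem.Dict.keys_empty]; exact List.nodup_nil)

theorem pv_G_getD (partition : List (Int × Int)) (c : Int) :
    (pvG partition).getD c [] = (partition.filter (fun p => p.2 == c)).map Prod.fst := by
  show (partition.foldl (fun d p => d.modify p.2 [] (fun ns => ns ++ [p.1])) PySem.Dict.empty).getD c [] = _
  have hmap : partition.foldl (fun d p => d.modify p.2 [] (fun ns => ns ++ [p.1])) PySem.Dict.empty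
      = (partition.map (fun p => (p.2, p.1))).foldl (fun d q => d.modify q.1 [] (fun ns => ns ++ [q.2])) PySem.Dict.empty := by
    rw [List.foldl_map]
  rw [hmap, PySem.Dict.getD_foldl_modify_append]
  simp only [PySem.Dict.getD_empty, List.nil_append, List.filter_map, List.map_map]
  rfl

theorem pv_G_items (partition : List (Int × Int)) :
    (pvG partition).items =
      (PySem.List.dedup (partition.map Prod.snd)).map
        (fun k => (k, (partition.filter (fun p => p.2 == k)).map Prod.fst)) := by
  rw [PySem.Dict.items_eq_map_keys (pvG partition) (pv_G_nodup_keys partition) []]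
  rw [pv_G_keys]
  apply List.map_congr_left
  intro k _
  rw [pv_G_getD]

theorem pv_key_unique (partition : List (Int × Int)) (hnd : (partition.map Prod.fst).Nodup)
    {n a b : Int} (ha : (n, a) ∈ partition) (hb : (n, b) ∈ partition) : a = b := by
  induction partition with
  | nil => simp at ha
  | cons q ps ih =>
    simp only [List.map_cons, List.nodup_cons] at hnd
    rcases List.mem_cons.mp ha with h1 | h1 <;> rcases List.mem_cons.mp hb with h2 | h2
    · rw [← h1] at h2; exact (Prod.mk.injEq _ _ _ _ ▸ h2).2.symm ▸ rfl
    · exact absurd (List.mem_map.mpr ⟨(n, b), h2, by rw [← h1]⟩) hnd.1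
    · exact absurd (List.mem_map.mpr ⟨(n, a), h1, by rw [← h2]⟩) hnd.1
    · exact ih hnd.2 h1 h2

theorem pv_nodup_flatMap (xs : List (Int × List Int))
    (h1 : ∀ p ∈ xs, p.2.Nodup)
    (h2 : xs.Pairwise (fun p q => ∀ n, n ∈ p.2 → n ∉ q.2)) :
    (xs.flatMap (fun c => c.2)).Nodup := by
  induction xs with
  | nil => exact List.nodup_nil
  | cons c xs ih =>
    rw [List.flatMap_cons]
    rw [List.pairwise_cons] at h2
    apply List.Nodup.append (h1 c List.mem_cons_self) (ih (fun p hp => h1 p (List.mem_cons_of_mem _ hp)) h2.2)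
    intro n hn hn'
    rcases List.mem_flatMap.mp hn' with ⟨q, hq, hnq⟩
    exact h2.1 q hq n hn hnq

theorem pv_max_char (xs : List Int) (x : Int) (hx : x ∈ xs) (hmax : ∀ y ∈ xs, y ≠ x → y < x) :
    PySem.List.max? xs (fun k => k) = some x := by
  cases hm : PySem.List.max? xs (fun k => k) with
  | none => exact absurd ((PySem.List.max?_eq_none_iff xs _).mp hm ▸ hx) (List.not_mem_nil)
  | some m =>
    have hmem : m ∈ xs := PySem.List.max?_mem hm
    have hle : x ≤ m := PySem.List.max?_isMax hm x hx
    by_cases hmx : m = x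
    · rw [hmx]
    · exact absurd hle (by have := hmax m hmem hmx; omega)

theorem pv_remove?_some (xs : List (Int × List Int)) (v : Int × List Int) (ys : List (Int × List Int))
    (h : PySem.List.remove? xs v = some ys) : v ∈ xs ∧ ys = xs.erase v := by
  have hv : v ∈ xs := by
    by_contra hn
    rw [(PySem.List.remove?_eq_none_iff xs v).mpr hn] at h
    simp at h
  refine ⟨hv, ?_⟩
  rw [PySem.List.remove?_eq_some_erase xs v hv] at h
  exact (Option.some.inj h).symm

theorem pv_flat_step (comms : List (Int × List Int)) (fst snd : Int × List Int) (next : Int)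
    (h1 : fst ∈ comms) (h2 : snd ∈ comms.erase fst) :
    ((((comms.erase fst).erase snd) ++ [(next, fst.2 ++ snd.2)]).flatMap (fun c => c.2)).Perm
      (comms.flatMap (fun c => c.2)) := by
  have p1 : comms.Perm (fst :: comms.erase fst) := List.perm_cons_erase h1
  have p2 : (comms.erase fst).Perm (snd :: (comms.erase fst).erase snd) := List.perm_cons_erase h2
  have f1 : (comms.flatMap (fun c => c.2)).Perm (fst.2 ++ (comms.erase fst).flatMap (fun c => c.2)) := by
    simpa using List.Perm.flatMap_right (fun c => c.2) p1
  have f2 : ((comms.erase fst).flatMap (fun c => c.2)).Perm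
      (snd.2 ++ ((comms.erase fst).erase snd).flatMap (fun c => c.2)) := by
    simpa using List.Perm.flatMap_right (fun c => c.2) p2
  have goal1 : ((((comms.erase fst).erase snd) ++ [(next, fst.2 ++ snd.2)]).flatMap (fun c => c.2)).Perm
      (((comms.erase fst).erase snd).flatMap (fun c => c.2) ++ (fst.2 ++ snd.2)) := by
    simp
  have big : (comms.flatMap (fun c => c.2)).Perm
      (fst.2 ++ (snd.2 ++ ((comms.erase fst).erase snd).flatMap (fun c => c.2))) :=
    f1.trans (f2.append_left fst.2)
  refine goal1.trans (List.perm_append_comm.trans ?_)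
  rw [List.append_assoc]
  exact big.symm

theorem pv_flat_loop (target : Int) (fuel : Nat) : ∀ (comms : List (Int × List Int)) (next : Int),
    ((pvMLoop target fuel comms next).flatMap (fun c => c.2)).Perm (comms.flatMap (fun c => c.2)) := by
  induction fuel with
  | zero => intro comms next; simp [pvMLoop]
  | succ fuel ih =>
    intro comms next
    rw [pvMLoop]
    split
    · cases hm1 : PySem.List.min? comms (fun c => c.2.length) with
      | none => simp
      | some fst =>
        dsimp only []
        cases hr1 : PySem.List.remove? comms fst with
        | none => dsimp only []; simp
        | some comms1 =>
          dsimp only []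
          cases hm2 : PySem.List.min? comms1 (fun c => c.2.length) with
          | none => dsimp only []; simp
          | some snd =>
            dsimp only []
            cases hr2 : PySem.List.remove? comms1 snd with
            | none => dsimp only []; simp
            | some comms2 =>
              dsimp only []
              obtain ⟨hv1, he1⟩ := pv_remove?_some _ _ _ hr1
              obtain ⟨hv2, he2⟩ := pv_remove?_some _ _ _ hr2
              subst he1; subst he2
              exact (ih _ _).trans (pv_flat_step comms fst snd next hv1 hv2)
    · exact List.Perm.refl _

theorem pv_loop_sim (fuel : Nat) : ∀ (comms : List (Int × List Int)) (next : Int)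
    (part : PySem.Dict Int Int) (target : Int),
    (comms.map Prod.fst).Nodup →
    (∀ k ∈ comms.map Prod.fst, k < next) →
    (comms ≠ [] → PySem.List.max? (comms.map Prod.fst) (fun k => k) = some (next - 1)) →
    (comms.flatMap (fun c => c.2)).Nodup →
    (∀ n ∈ comms.flatMap (fun c => c.2), n ∈ part.keys) →
    (∀ l ns, (l, ns) ∈ comms → ∀ n ∈ ns, part.get? n = some l) →
    part.keys.Nodup →
    ((comms.length : Int) ≤ target + fuel) →
    (1 ≤ target ∨ (comms.length : Int) ≤ target) →
    pvALoop target fuel (PySem.Dict.mk comms) part =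
      pvBFinal (pvMLoop target fuel comms next) part := by
  induction fuel with
  | zero =>
    intro comms next part target h1 h2 h3 h4 h5 h6 h7 h8 h9
    show part = pvBFinal comms part
    exact (pv_final_noop comms part h7 h6).symm
  | succ fuel ih =>
    intro comms next part target h1 h2 h3 h4 h5 h6 h7 h8 h9
    rw [pvALoop, pvMLoop]
    have esz : (PySem.Dict.mk comms).size = comms.length := rfl
    rw [esz]
    by_cases hcond : target < (comms.length : Int)
    case neg =>
      rw [if_neg hcond, if_neg hcond]
      exact (pv_final_noop comms part h7 h6).symm
    case pos =>
    rw [if_pos hcond, if_pos hcond]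
    have htgt : 1 ≤ target := by
      rcases h9 with h | h
      · exact h
      · omega
    have hlen2 : 2 ≤ comms.length := by omega
    have hne : comms ≠ [] := by intro h; subst h; simp at hlen2
    obtain ⟨fst, hm1⟩ : ∃ f, PySem.List.min? comms (fun c => c.2.length) = some f := by
      cases hm : PySem.List.min? comms (fun c => c.2.length) with
      | none => exact absurd ((PySem.List.min?_eq_none_iff _ _).mp hm) hne
      | some f => exact ⟨f, rfl⟩
    have hv1 : fst ∈ comms := PySem.List.min?_mem hm1
    have hr1 : PySem.List.remove? comms fst = some (comms.erase fst) :=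
      PySem.List.remove?_eq_some_erase comms fst hv1
    have hlen1 : (comms.erase fst).length = comms.length - 1 := List.length_erase_of_mem hv1
    have hne1 : comms.erase fst ≠ [] := by
      intro h
      rw [h] at hlen1
      simp at hlen1
      omega
    obtain ⟨snd, hm2⟩ : ∃ f, PySem.List.min? (comms.erase fst) (fun c => c.2.length) = some f := by
      cases hm : PySem.List.min? (comms.erase fst) (fun c => c.2.length) with
      | none => exact absurd ((PySem.List.min?_eq_none_iff _ _).mp hm) hne1
      | some f => exact ⟨f, rfl⟩
    have hv2 : snd ∈ comms.erase fst := PySem.List.min?_mem hm2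
    have hr2 : PySem.List.remove? (comms.erase fst) snd = some ((comms.erase fst).erase snd) :=
      PySem.List.remove?_eq_some_erase _ snd hv2
    rw [hm1]; dsimp only []
    rw [hr1]; dsimp only []
    rw [hm2]; dsimp only []
    rw [hr2]; dsimp only []
    have hitems : (PySem.Dict.mk comms).items = comms := rfl
    have hsort : PySem.List.sorted (PySem.Dict.mk comms).items (fun x => x.2.length) false =
        fst :: snd :: PySem.List.sorted (((comms.erase fst).erase snd)) (fun x => x.2.length) false := by
      have hs1 := pv_sorted_cons_min (fun c : Int × List Int => c.2.length) comms fst hm1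
      have hs2 := pv_sorted_cons_min (fun c : Int × List Int => c.2.length) (comms.erase fst) snd hm2
      rw [hs2] at hs1
      rw [hitems, hs1]
    rw [hsort]
    obtain ⟨c1, ns1⟩ := fst
    obtain ⟨c2, ns2⟩ := snd
    dsimp only []
    have hkeys : (PySem.Dict.mk comms).keys = comms.map Prod.fst := rfl
    have hmax : PySem.List.max? ((PySem.Dict.mk comms).keys) (fun k => k) = some (next - 1) := by
      rw [hkeys]; exact h3 hne
    rw [hmax]
    dsimp only []
    have hnext : next - 1 + 1 = next := by omega
    rw [hnext]
    set comms2 := ((comms.erase (c1, ns1)).erase (c2, ns2)) with hc2def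
    set mergedNodes := ns1 ++ ns2 with hmn
    set comms' := comms2 ++ [(next, mergedNodes)] with hc'
    set part' := mergedNodes.foldl (fun d n => d.insert n next) part with hp'
    have hfresh : next ∉ comms.map Prod.fst := fun h => absurd (h2 next h) (by omega)
    have hAitems : (((((PySem.Dict.mk comms).insert next mergedNodes).erase c1).erase c2)) =
        PySem.Dict.mk comms' := by
      apply PySem.Dict.ext
      rw [pv_step_items comms next mergedNodes c1 ns1 c2 ns2 h1 hfresh hv1 hv2]
    rw [hAitems]
    have hsub2 : (comms2.map Prod.fst).Sublist (comms.map Prod.fst) :=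
      ((pv_erase_sub _ _).trans (pv_erase_sub _ _))
    have hflatperm : (comms'.flatMap (fun c => c.2)).Perm (comms.flatMap (fun c => c.2)) :=
      pv_flat_step comms (c1, ns1) (c2, ns2) next hv1 hv2
    have hflatnodup' : (comms'.flatMap (fun c => c.2)).Nodup := hflatperm.nodup_iff.mpr h4
    have hdecomp : (comms'.flatMap (fun c => c.2)) =
        comms2.flatMap (fun c => c.2) ++ mergedNodes := by
      simp [hc', hmn]
    have hmergedmem : ∀ n ∈ mergedNodes, n ∈ comms.flatMap (fun c => c.2) := by
      intro n hn
      exact hflatperm.mem_iff.mp (hdecomp ▸ List.mem_append_right _ hn)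
    rw [ih comms' (next + 1) part' target ?i1 ?i2 ?i3 ?i4 ?i5 ?i6 ?i7 ?i8 (Or.inl htgt)]
    case i1 =>
      have hnd2 : (comms2.map Prod.fst).Nodup := h1.sublist hsub2
      have hnotin : next ∉ comms2.map Prod.fst := fun h => hfresh (hsub2.mem h)
      rw [hc', List.map_append]
      refine List.Nodup.append hnd2 (by simp) ?_
      intro k hk hk'
      simp only [List.map_cons, List.map_nil, List.mem_singleton] at hk'
      subst hk'
      exact hnotin hk
    case i2 =>
      intro k hk
      simp only [hc', List.map_append, List.mem_append, List.map_cons] at hk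
      rcases hk with hk | hk
      · have := h2 k (hsub2.mem hk)
        omega
      · simp at hk
        omega
    case i3 =>
      intro _
      apply pv_max_char
      · simp [hc']
      · intro y hy hyne
        simp only [hc', List.map_append, List.mem_append] at hy
        rcases hy with hy | hy
        · have := h2 y (hsub2.mem hy)
          omega
        · simp at hy
          omega
    case i4 => exact hflatnodup'
    case i5 =>
      intro n hn
      exact pv_mem_keys_foldl_insert _ _ _ _ (h5 n (hflatperm.mem_iff.mp hn))
    case i6 =>
      intro l ns hlns n hn
      rw [hp', pv_get?_foldl_insert]
      rcases List.mem_append.mp (hc' ▸ hlns) with hold | hnew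
      · have hnfl2 : n ∈ comms2.flatMap (fun c => c.2) := List.mem_flatMap.mpr ⟨(l, ns), hold, hn⟩
        have hdisj : n ∉ mergedNodes := by
          have hnodup : (comms2.flatMap (fun c => c.2) ++ mergedNodes).Nodup :=
            hdecomp ▸ hflatnodup'
          intro hcontra
          exact (List.disjoint_of_nodup_append hnodup) hnfl2 hcontra
        rw [if_neg hdisj]
        have hmem : (l, ns) ∈ comms :=
          (List.erase_sublist.trans List.erase_sublist).mem hold
        exact h6 l ns hmem n hn
      · simp only [List.mem_singleton] at hnew
        have : l = next ∧ ns = mergedNodes := by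
          have := Prod.mk.injEq l ns next mergedNodes ▸ hnew
          exact ⟨congrArg Prod.fst hnew, congrArg Prod.snd hnew⟩
        rw [if_pos (this.2 ▸ hn), this.1]
    case i7 => exact pv_nodup_keys_foldl_insert _ _ _ h7
    case i8 =>
      have : comms'.length = comms.length - 1 := by
        have e1 : (comms.erase (c1, ns1)).length = comms.length - 1 := List.length_erase_of_mem hv1
        have e2 : comms2.length = (comms.erase (c1, ns1)).length - 1 := List.length_erase_of_mem hv2
        simp [hc', e2, e1]
        omega
      rw [this]
      push_cast [Nat.cast_sub (by omega : 1 ≤ comms.length)] at *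
      omega
    rw [hp']
    exact pv_final_absorb_fold mergedNodes _ part next (fun n hn =>
      ⟨h5 n (hmergedmem n hn),
        (pv_flat_loop target fuel comms' (next + 1)).mem_iff.mpr
          (hdecomp ▸ List.mem_append_right _ hn)⟩)

theorem pv_memx (partition : List (Int × Int)) (p : Int × List Int) (n : Int)
    (hp : p ∈ (pvG partition).items) (hn : n ∈ p.2) : (n, p.1) ∈ partition := by
  rw [pv_G_items] at hp
  obtain ⟨k, _, hk⟩ := List.mem_map.mp hp
  obtain ⟨q, hq, hq1⟩ := List.mem_map.mp (by rw [← hk] at hn; exact (hn : n ∈ _))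
  obtain ⟨hqmem, hqk⟩ := List.mem_filter.mp hq
  have hk1 : p.1 = k := by rw [← hk]
  have : q = (n, p.1) := by
    apply Prod.ext
    · exact hq1
    · rw [hk1]; exact beq_iff_eq.mp hqk
  rw [← this]
  exact hqmem

-- ===== new lemmas: two-queue loop ≡ min-scan loop, and the final relabelling pass =====

def pvMinStep {α : Type} (key : α → Nat) : Option α → α → Option α :=
  fun acc x =>
    match acc with
    | none => some x
    | some m => if key x < key m then some x else some m

theorem pv_min?_eq_foldl {α : Type} (key : α → Nat) (xs : List α) :
    PySem.List.min? xs key = xs.foldl (pvMinStep key) none := rfl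

theorem pv_min?_foldl_some {α : Type} (key : α → Nat) (ys : List α) (a : α) :
    ys.foldl (pvMinStep key) (some a) =
    match PySem.List.min? ys key with
    | none => some a
    | some b => if key b < key a then some b else some a := by
  induction ys generalizing a with
  | nil => rfl
  | cons y ys ih =>
    have hstep : pvMinStep key (some a) y = if key y < key a then some y else some a := rfl
    have hcons : PySem.List.min? (y :: ys) key = ys.foldl (pvMinStep key) (some y) := rfl
    rw [List.foldl_cons, hstep, hcons, ih y]
    by_cases h : key y < key a
    · rw [if_pos h, ih y]
      cases hm : PySem.List.min? ys key with
      | none => simp [h]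
      | some b =>
        by_cases hb : key b < key y
        · have hba : key b < key a := by omega
          simp [hb, hba]
        · simp [hb, h]
    · rw [if_neg h, ih a]
      cases hm : PySem.List.min? ys key with
      | none =>
        have h' : ¬ key y < key a := h
        simp [h']
      | some b =>
        by_cases hb : key b < key y
        · by_cases hba : key b < key a
          · simp [hb, hba]
          · simp [hb, hba]
        · by_cases hba : key b < key a
          · exfalso; omega
          · have h' : ¬ key y < key a := h
            simp [hb, hba, h']

theorem pv_min?_cons {α : Type} (key : α → Nat) (x : α) (t : List α) :
    PySem.List.min? (x :: t) key =
      match PySem.List.min? t key with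
      | none => some x
      | some m => if key m < key x then some m else some x := by
  rw [pv_min?_eq_foldl, List.foldl_cons]
  show t.foldl (pvMinStep key) (some x) = _
  exact pv_min?_foldl_some key t x

theorem pv_min?_append {α : Type} (key : α → Nat) (xs ys : List α) :
    PySem.List.min? (xs ++ ys) key =
      match PySem.List.min? xs key with
      | none => PySem.List.min? ys key
      | some a =>
        match PySem.List.min? ys key with
        | none => some a
        | some b => if key b < key a then some b else some a := by
  cases hx : PySem.List.min? xs key with
  | none =>
    have : xs = [] := (PySem.List.min?_eq_none_iff xs key).mp hx
    subst this; rfl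
  | some a =>
    rw [pv_min?_eq_foldl, List.foldl_append, ← pv_min?_eq_foldl, hx, pv_min?_foldl_some]

theorem pv_min?_head_pairwise {α : Type} (key : α → Nat) (m : α) (t : List α)
    (h : ∀ y ∈ t, key m ≤ key y) :
    PySem.List.min? (m :: t) key = some m := by
  rw [pv_min?_cons]
  cases hm : PySem.List.min? t key with
  | none => rfl
  | some b =>
    have : ¬ key b < key m := by
      have := h b (PySem.List.min?_mem hm)
      omega
    simp [this]

theorem pv_head_sorted_min {α : Type} [BEq α] [LawfulBEq α] (key : α → Nat) (O : List α)
    (s : α) (S' : List α) (h : PySem.List.sorted O key false = s :: S') :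
    PySem.List.min? O key = some s ∧ S' = PySem.List.sorted (O.erase s) key false := by
  have hne : O ≠ [] := by
    intro h0; subst h0; simp [PySem.List.sorted] at h
  obtain ⟨m, hm⟩ : ∃ m, PySem.List.min? O key = some m := by
    cases hmm : PySem.List.min? O key with
    | none => exact absurd ((PySem.List.min?_eq_none_iff _ _).mp hmm) hne
    | some m => exact ⟨m, rfl⟩
  have hthis := pv_sorted_cons_min key O m hm
  rw [h] at hthis
  obtain ⟨h1, h2⟩ := List.cons_eq_cons.mp hthis
  subst h1
  exact ⟨hm, h2⟩

-- the pick step: under the queue invariants, pvPick returns the first minimum of the current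
-- community list (survivors-of-q1 ++ FIFO) and its removal keeps the invariants.
theorem pv_pick_spec (q1 q2 O M : List (Int × List Int)) (i j : Nat)
    (hS : q1.drop i = PySem.List.sorted O (fun c => c.2.length) false)
    (hM : q2.drop j = M) (hj : j ≤ q2.length)
    (hnd : ((O ++ M).map Prod.fst).Nodup)
    (hpw : M.Pairwise (fun a b => a.2.length ≤ b.2.length))
    (hne : O ++ M ≠ []) :
    ∃ c O' M' i' j',
      pvPick q1 q2 i j = some (c, i', j') ∧
      PySem.List.min? (O ++ M) (fun c => c.2.length) = some c ∧
      (O ++ M).erase c = O' ++ M' ∧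
      q1.drop i' = PySem.List.sorted O' (fun c => c.2.length) false ∧
      q2.drop j' = M' ∧ j' ≤ q2.length ∧
      M'.Sublist M := by
  cases hSo : PySem.List.sorted O (fun c : Int × List Int => c.2.length) false with
  | nil =>
    have hO : O = [] := (PySem.List.sorted_eq_nil_iff _ _ _).mp hSo
    subst hO
    match hMc : M, hpw, hM, hnd, hne with
    | [], _, _, _, hne => simp at hne
    | m :: t, hpw, hM, hnd, _ =>
      have hilen : ¬ i < q1.length := by
        have h0 : q1.drop i = [] := by rw [hS, hSo]
        have := List.drop_eq_nil_iff.mp h0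
        omega
      have hq2j : q2[j]? = some m := by
        rw [← List.head?_drop, hM]; rfl
      have hjlt : j < q2.length := by
        by_contra hc
        have h0 : q2.drop j = [] := List.drop_eq_nil_iff.mpr (by omega)
        rw [hM] at h0; simp at h0
      refine ⟨m, [], t, i, j + 1, ?_, ?_, by simp, by rw [hS, hSo],
        by rw [← List.tail_drop, hM, List.tail_cons], by omega, List.sublist_cons_self _ _⟩
      · unfold pvPick
        rw [if_neg (by intro hcc; exact hilen hcc.1), hq2j]
        rfl
      · simp only [List.nil_append]
        rw [List.pairwise_cons] at hpw
        exact pv_min?_head_pairwise _ m t (fun y hy => hpw.1 y hy)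
  | cons s S' =>
    have hiq : q1[i]? = some s := by rw [← List.head?_drop, hS, hSo]; rfl
    have hilen : i < q1.length := by
      by_contra hc
      have h0 : q1.drop i = [] := List.drop_eq_nil_iff.mpr (by omega)
      rw [hS, hSo] at h0; simp at h0
    have hgetD1 : q1.getD i (0, []) = s := by
      rw [List.getD_eq_getElem?_getD, hiq]; rfl
    obtain ⟨hminO, hS'⟩ := pv_head_sorted_min (fun c : Int × List Int => c.2.length) O s S' hSo
    have hsO : s ∈ O := PySem.List.min?_mem hminO
    have hdropS : q1.drop (i + 1) = PySem.List.sorted (O.erase s) (fun c => c.2.length) false := by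
      rw [← List.tail_drop, hS, hSo, List.tail_cons, hS']
    match hMc : M, hpw, hM, hnd, hne with
    | [], _, hM, _, _ =>
      have hjlen : q2.length ≤ j := by
        have h0 : q2.drop j = [] := hM
        exact List.drop_eq_nil_iff.mp h0
      refine ⟨s, O.erase s, [], i + 1, j, ?_, by simpa using hminO,
        by simp only [List.append_nil],
        hdropS, hM, hj, List.Sublist.refl _⟩
      unfold pvPick
      rw [if_pos ⟨hilen, Or.inl hjlen⟩, hiq]
      rfl
    | m :: t, hpw, hM, hnd, _ =>
      have hjq : q2[j]? = some m := by rw [← List.head?_drop, hM]; rfl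
      have hjlt : j < q2.length := by
        by_contra hc
        have h0 : q2.drop j = [] := List.drop_eq_nil_iff.mpr (by omega)
        rw [hM] at h0; simp at h0
      have hgetD2 : q2.getD j (0, []) = m := by
        rw [List.getD_eq_getElem?_getD, hjq]; rfl
      have hminM : PySem.List.min? (m :: t) (fun c : Int × List Int => c.2.length) = some m := by
        rw [List.pairwise_cons] at hpw
        exact pv_min?_head_pairwise _ m t (fun y hy => hpw.1 y hy)
      have hcomb := pv_min?_append (fun c : Int × List Int => c.2.length) O (m :: t)
      rw [hminO, hminM] at hcomb
      by_cases hle : s.2.length ≤ m.2.length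
      · refine ⟨s, O.erase s, m :: t, i + 1, j, ?_, ?_, List.erase_append_left _ hsO,
          hdropS, hM, hj, List.Sublist.refl _⟩
        · unfold pvPick
          rw [if_pos ⟨hilen, Or.inr (by rw [hgetD1, hgetD2]; exact hle)⟩, hiq]
          rfl
        · rw [hcomb]
          have hx : ¬ m.2.length < s.2.length := by omega
          simp [hx]
      · have hmO : m ∉ O := by
          intro hmem
          have h1 : m.1 ∈ O.map Prod.fst := List.mem_map.mpr ⟨m, hmem, rfl⟩
          have h2 : m.1 ∈ (m :: t).map Prod.fst := List.mem_map.mpr ⟨m, List.mem_cons_self, rfl⟩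
          rw [List.map_append] at hnd
          exact (List.disjoint_of_nodup_append hnd) h1 h2
        refine ⟨m, O, t, i, j + 1, ?_, ?_,
          by rw [List.erase_append_right _ hmO, List.erase_cons_head],
          hS, by rw [← List.tail_drop, hM, List.tail_cons], by omega, List.sublist_cons_self _ _⟩
        · unfold pvPick
          rw [if_neg (by
            intro hcc
            rcases hcc.2 with hcc2 | hcc2
            · omega
            · rw [hgetD1, hgetD2] at hcc2; exact hle hcc2), hjq]
          rfl
        · rw [hcomb]
          have hx : m.2.length < s.2.length := by omega
          simp [hx]

-- main correspondence: the two-queue loop simulates the min-scan loop.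
theorem pv_queue_sim (fuel : Nat) : ∀ (O M q1 q2 : List (Int × List Int)) (i j : Nat)
    (next target num : Int),
    q1.drop i = PySem.List.sorted O (fun c => c.2.length) false →
    q2.drop j = M → j ≤ q2.length →
    ((O ++ M).map Prod.fst).Nodup →
    M.Pairwise (fun a b => a.2.length ≤ b.2.length) →
    (∀ m ∈ M, ∀ x ∈ O ++ M, m.2.length ≤ 2 * x.2.length) →
    (∀ k ∈ (O ++ M).map Prod.fst, k < next) →
    num = ((O ++ M).length : Int) →
    (1 ≤ target ∨ num ≤ target) →
    ∃ O' M',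
      pvMLoop target fuel (O ++ M) next = O' ++ M' ∧
      q1.drop (pvBLoop target fuel q1 q2 i j next num).2.1 =
        PySem.List.sorted O' (fun c => c.2.length) false ∧
      (pvBLoop target fuel q1 q2 i j next num).1.drop
        (pvBLoop target fuel q1 q2 i j next num).2.2 = M' := by
  induction fuel with
  | zero =>
    intro O M q1 q2 i j next target num hS hM hj hnd hpw hlb hfr hnum h9
    exact ⟨O, M, rfl, hS, hM⟩
  | succ fuel ih =>
    intro O M q1 q2 i j next target num hS hM hj hnd hpw hlb hfr hnum h9
    rw [pvMLoop, pvBLoop]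
    by_cases hcond : target < num
    case neg =>
      rw [if_neg hcond, if_neg (by rw [← hnum]; exact hcond)]
      exact ⟨O, M, rfl, hS, hM⟩
    case pos =>
      rw [if_pos hcond, if_pos (by rw [← hnum]; exact hcond)]
      have htgt : 1 ≤ target := by
        rcases h9 with h | h
        · exact h
        · omega
      have hlen2 : 2 ≤ (O ++ M).length := by
        have hc' := hcond
        rw [hnum] at hc'
        omega
      have hne : O ++ M ≠ [] := by intro h; rw [h] at hlen2; simp at hlen2
      obtain ⟨c1, O1, M1, i1, j1, hp1, hmin1, her1, hS1, hM1, hj1, hsub1⟩ :=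
        pv_pick_spec q1 q2 O M i j hS hM hj hnd hpw hne
      have hc1mem : c1 ∈ O ++ M := PySem.List.min?_mem hmin1
      have hlen1 : (O1 ++ M1).length = (O ++ M).length - 1 := by
        rw [← her1]; exact List.length_erase_of_mem hc1mem
      have hnd1 : ((O1 ++ M1).map Prod.fst).Nodup := by
        rw [← her1]; exact hnd.sublist (pv_erase_sub _ _)
      have hpw1 : M1.Pairwise (fun a b => a.2.length ≤ b.2.length) := hpw.sublist hsub1
      have hne1 : O1 ++ M1 ≠ [] := by
        intro h
        rw [h] at hlen1
        simp only [List.length_nil] at hlen1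
        omega
      obtain ⟨c2, O2, M2, i2, j2, hp2, hmin2, her2, hS2, hM2, hj2, hsub2⟩ :=
        pv_pick_spec q1 q2 O1 M1 i1 j1 hS1 hM1 hj1 hnd1 hpw1 hne1
      have hc2mem : c2 ∈ O1 ++ M1 := PySem.List.min?_mem hmin2
      have hlen2' : (O2 ++ M2).length = (O1 ++ M1).length - 1 := by
        rw [← her2]; exact List.length_erase_of_mem hc2mem
      -- reduce the min-scan side
      rw [hmin1]; dsimp only []
      rw [PySem.List.remove?_eq_some_erase _ _ hc1mem]; dsimp only []
      rw [her1, hmin2]; dsimp only []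
      rw [PySem.List.remove?_eq_some_erase _ _ hc2mem]; dsimp only []
      rw [her2]
      -- reduce the two-queue side
      rw [hp1]; dsimp only []
      rw [hp2]; dsimp only []
      -- minimality facts
      have hmin1' : ∀ x ∈ O ++ M, c1.2.length ≤ x.2.length :=
        fun x hx => PySem.List.min?_isMin hmin1 x hx
      have hmin2' : ∀ x ∈ O1 ++ M1, c2.2.length ≤ x.2.length :=
        fun x hx => PySem.List.min?_isMin hmin2 x hx
      have hc2big : c1.2.length ≤ c2.2.length := by
        have : c2 ∈ O ++ M := by
          rw [← her1] at hc2mem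
          exact List.erase_sublist.mem hc2mem
        exact hmin1' c2 this
      have hsubx : ∀ x ∈ O2 ++ M2, x ∈ O1 ++ M1 := by
        intro x hx
        rw [← her2] at hx
        exact List.erase_sublist.mem hx
      have hsubx0 : ∀ x ∈ O1 ++ M1, x ∈ O ++ M := by
        intro x hx
        rw [← her1] at hx
        exact List.erase_sublist.mem hx
      -- apply IH at the merged state
      have happ : (O2 ++ M2) ++ [(next, c1.2 ++ c2.2)] = O2 ++ (M2 ++ [(next, c1.2 ++ c2.2)]) := by
        rw [List.append_assoc]
      rw [happ]
      have hq2drop : (q2 ++ [(next, c1.2 ++ c2.2)]).drop j2 = M2 ++ [(next, c1.2 ++ c2.2)] := by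
        rw [List.drop_append_of_le_length hj2, hM2]
      have hnd2 : (((O2 ++ (M2 ++ [(next, c1.2 ++ c2.2)])).map Prod.fst)).Nodup := by
        rw [← List.append_assoc, List.map_append]
        apply List.Nodup.append
        · exact hnd1.sublist (her2 ▸ pv_erase_sub _ _)
        · simp
        · intro k hk hk'
          simp only [List.map_cons, List.map_nil, List.mem_singleton] at hk'
          subst hk'
          have : k ∈ (O ++ M).map Prod.fst := by
            obtain ⟨x, hx, hxk⟩ := List.mem_map.mp hk
            exact List.mem_map.mpr ⟨x, hsubx0 x (hsubx x hx), hxk⟩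
          exact absurd (hfr _ this) (by omega)
      have hpw2 : (M2 ++ [(next, c1.2 ++ c2.2)]).Pairwise (fun a b => a.2.length ≤ b.2.length) := by
        rw [List.pairwise_append]
        refine ⟨hpw1.sublist hsub2, by simp, ?_⟩
        intro a ha b hb
        simp only [List.mem_singleton] at hb
        subst hb
        have haM : a ∈ M := hsub1.mem (hsub2.mem ha)
        have := hlb a haM c1 hc1mem
        simp only [List.length_append]
        omega
      have hlb2 : ∀ m ∈ M2 ++ [(next, c1.2 ++ c2.2)],
          ∀ x ∈ O2 ++ (M2 ++ [(next, c1.2 ++ c2.2)]), m.2.length ≤ 2 * x.2.length := by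
        intro m hm x hx
        rw [← List.append_assoc] at hx
        rcases List.mem_append.mp hx with hx1 | hx1
        · rcases List.mem_append.mp hm with hm1 | hm1
          · exact hlb m (hsub1.mem (hsub2.mem hm1)) x (hsubx0 x (hsubx x hx1))
          · simp only [List.mem_singleton] at hm1
            subst hm1
            have := hmin2' x (hsubx x hx1)
            simp only [List.length_append]
            omega
        · simp only [List.mem_singleton] at hx1
          subst hx1
          simp only [List.length_append]
          rcases List.mem_append.mp hm with hm1 | hm1
          · have := hlb m (hsub1.mem (hsub2.mem hm1)) c1 hc1mem
            omega
          · simp only [List.mem_singleton] at hm1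
            subst hm1
            simp only [List.length_append]
            omega
      have hfr2 : ∀ k ∈ (O2 ++ (M2 ++ [(next, c1.2 ++ c2.2)])).map Prod.fst, k < next + 1 := by
        intro k hk
        rw [← List.append_assoc, List.map_append, List.mem_append] at hk
        rcases hk with hk | hk
        · have : k ∈ (O ++ M).map Prod.fst := by
            obtain ⟨x, hx, hxk⟩ := List.mem_map.mp hk
            exact List.mem_map.mpr ⟨x, hsubx0 x (hsubx x hx), hxk⟩
          have := hfr k this
          omega
        · simp at hk
          omega
      have hnum2 : num - 1 = ((O2 ++ (M2 ++ [(next, c1.2 ++ c2.2)])).length : Int) := by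
        rw [← List.append_assoc, List.length_append, hlen2', hlen1]
        simp only [List.length_cons, List.length_nil]
        have h2 : 2 ≤ (O ++ M).length := hlen2
        rw [hnum]
        push_cast [Nat.cast_sub (by omega : 1 ≤ (O ++ M).length)]
        omega
      obtain ⟨O', M', hL, hI, hJ⟩ := ih O2 (M2 ++ [(next, c1.2 ++ c2.2)]) q1
        (q2 ++ [(next, c1.2 ++ c2.2)]) i2 j2 (next + 1) target (num - 1)
        hS2 hq2drop (by rw [List.length_append]; simp only [List.length_cons, List.length_nil]; omega)
        hnd2 hpw2 hlb2 hfr2 hnum2 (Or.inl htgt)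
      exact ⟨O', M', hL, hI, hJ⟩

-- ===== VERDICT (by name: the statement is the Claim_ definition above) =====
theorem merge_communities_spec : Claim_equal_merge_communities := by
  intro G partition target _hdom hpre
  obtain ⟨hnd, hor⟩ := hpre
  show merge_communities G partition target = merge_communities_alt G partition target
  unfold merge_communities merge_communities_alt
  rw [pv_AGroup_eq, pv_BGroup_eq]
  dsimp only []
  have hnd' : ((PySem.Dict.mk partition).keys).Nodup := hnd
  have hxsnd : ((pvG partition).items.map Prod.fst).Nodup := pv_G_nodup_keys partition
  have hlenc : ((pvG partition).items.length : Int) =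
      ((PySem.List.dedup (partition.map Prod.snd)).length : Int) := by
    rw [pv_G_items]
    simp
  cases hxe : (pvG partition).items with
  | nil =>
    have hk : (pvG partition).keys = [] := by
      show (pvG partition).items.map _ = []
      rw [hxe]; rfl
    have hsz : (pvG partition).size = 0 := by
      show (pvG partition).items.length = 0
      rw [hxe]; rfl
    rw [hsz, hk]
    rfl
  | cons x xs0 =>
    rw [← hxe]
    set xs := (pvG partition).items with hxs
    have hne : xs ≠ [] := by rw [hxe]; simp
    have hkeys : (pvG partition).keys = xs.map Prod.fst := rfl
    obtain ⟨m, hm⟩ : ∃ m, PySem.List.max? ((pvG partition).keys) (fun k => k) = some m := by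
      cases hmm : PySem.List.max? ((pvG partition).keys) (fun k => k) with
      | none =>
        have := (PySem.List.max?_eq_none_iff _ _).mp hmm
        rw [hkeys] at this
        simp only [List.map_eq_nil_iff] at this
        exact absurd this hne
      | some m => exact ⟨m, rfl⟩
    rw [hm]
    have hmk : pvG partition = PySem.Dict.mk xs := rfl
    have hsz : (pvG partition).size = xs.length := rfl
    rw [hsz, hmk]
    -- invariants at the initial state
    have hflat : ∀ p ∈ xs, ∀ n ∈ p.2, (n, p.1) ∈ partition := by
      intro p hp n hn
      exact pv_memx partition p n (hxs ▸ hp) hn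
    have hpair : xs.Pairwise (fun p q => p.1 ≠ q.1) :=
      List.pairwise_map.mp hxsnd
    have h4 : (xs.flatMap (fun c => c.2)).Nodup := by
      apply pv_nodup_flatMap
      · intro p hp
        have : p.2 = (partition.filter (fun q => q.2 == p.1)).map Prod.fst := by
          have := hxs ▸ hp
          rw [pv_G_items] at this
          obtain ⟨k, _, hk⟩ := List.mem_map.mp this
          rw [← hk]
        rw [this]
        exact hnd.sublist (List.Sublist.map Prod.fst List.filter_sublist)
      · apply hpair.imp_of_mem
        intro p q hp hq hne' n hnp hnq
        exact hne' (pv_key_unique partition hnd (hflat p hp n hnp) (hflat q hq n hnq))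
    have h8 : 0 ≤ target := by
      rcases hor with h | h
      · omega
      · rw [← hlenc] at h
        have : (0 : Int) ≤ (xs.length : Int) := by positivity
        omega
    have hfr : ∀ k ∈ xs.map Prod.fst, k < m + 1 := fun k hk => by
      have := PySem.List.max?_isMax (hkeys ▸ hm) k (hkeys ▸ hk); omega
    have hor' : 1 ≤ target ∨ ((xs.length : Int)) ≤ target := by
      rcases hor with h | h
      · exact Or.inl h
      · exact Or.inr (by rw [hlenc]; exact h)
    have hkeysmem : ∀ n ∈ xs.flatMap (fun c => c.2), n ∈ (PySem.Dict.mk partition).keys := by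
      intro n hn
      obtain ⟨p, hp, hnp⟩ := List.mem_flatMap.mp hn
      exact List.mem_map.mpr ⟨(n, p.1), hflat p hp n hnp, rfl⟩
    -- A-side: sort-based loop = final relabelling of the min-scan loop
    rw [pv_loop_sim xs.length xs (m + 1) (PySem.Dict.mk partition) target hxsnd
      hfr
      (fun _ => by rw [← hkeys]; simpa using hm)
      h4
      hkeysmem
      (fun l ns hlns n hn =>
        PySem.Dict.get?_of_mem_items (PySem.Dict.mk partition)
          (hflat (l, ns) hlns n hn) hnd')
      hnd'
      (by omega)
      hor']
    -- B-side: two-queue loop simulates the min-scan loop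
    have hlenq : (PySem.List.sorted xs (fun c : Int × List Int => c.2.length) false).length
        = xs.length := PySem.List.length_sorted _ _ _
    obtain ⟨O', M', hL, hI, hJ⟩ := pv_queue_sim xs.length xs []
      (PySem.List.sorted xs (fun c => c.2.length) false) [] 0 0 (m + 1) target
      ((xs.length : Int))
      (by rw [List.drop_zero])
      (by rw [List.drop_zero])
      (by omega)
      (by rw [List.append_nil]; exact hxsnd)
      (by simp)
      (by simp)
      (by rw [List.append_nil]; exact hfr)
      (by rw [List.append_nil])
      hor'
    rw [List.append_nil] at hL
    rw [← hlenq] at hL hI hJ ⊢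
    rw [hL, hJ]
    -- A's final list splits into the surviving originals (a no-op relabelling) and the merged FIFO
    have hsplit : pvBFinal (O' ++ M') (PySem.Dict.mk partition) =
        pvBFinal M' (pvBFinal O' (PySem.Dict.mk partition)) := by
      simp [pvBFinal, List.foldl_append]
    have hOsub : ∀ c ∈ O', c ∈ xs := by
      intro c hc
      have h1 : c ∈ PySem.List.sorted O' (fun c : Int × List Int => c.2.length) false :=
        (PySem.List.mem_sorted _ _ _ _).mpr hc
      rw [← hI] at h1
      have h2 := List.mem_of_mem_drop h1
      exact (PySem.List.mem_sorted _ _ _ _).mp h2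
    have hnoop : pvBFinal O' (PySem.Dict.mk partition) = PySem.Dict.mk partition := by
      apply pv_final_noop _ _ hnd'
      intro l ns hlns n hn
      exact PySem.Dict.get?_of_mem_items (PySem.Dict.mk partition)
        (hflat (l, ns) (hOsub _ hlns) n hn) hnd'
    rw [hsplit, hnoop]
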